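-- pv_equiv track=rewrite | github.com/Atomato/Reinforce-Paraphrase-Generation | src/read_merged.py | replace_sentence_token
-- ===== SOURCE A (Python) =====
-- def replace_sentence_token(sentence):
--     #############<expr>에 대한 작업###################
--     split_tmp = sentence.split("<EXPR>")
--     n_expr = len(split_tmp) - 1
--     sentence = split_tmp[0]
--     i = 0
--     while (i < n_expr):
--         sentence = sentence + "<EXPR" + str(i) + ">" + split_tmp[i + 1]
--         i += 1
--     #############<expr>에 대한 작업###################
--
--     #############<arrw>에 대한 작업###################
--     split_tmp = sentence.split("<ARRW>")
--     n_arrw = len(split_tmp) - 1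
--     sentence = split_tmp[0]
--     i = 0
--     while (i < n_arrw):
--         sentence = sentence + "<ARRW" + str(i) + ">" + split_tmp[i + 1]
--         i += 1
--     #############<arrw>에 대한 작업###################
--
--     #############<unvar>에 대한 작업###################
--     split_tmp = sentence.split("<UNVAR>")
--     n_unvar = len(split_tmp) - 1
--     sentence = split_tmp[0]
--     i = 0
--     while (i < n_unvar):
--         sentence = sentence + "<UNVAR" + str(i) + ">" + split_tmp[i + 1]
--         i += 1
--     #############<unvar>에 대한 작업###################
--
--     #############<equl>에 대한 작업###################
--     split_tmp = sentence.split("<EQUL>")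
--     n_equl = len(split_tmp) - 1
--     sentence = split_tmp[0]
--     i = 0
--     while (i < n_equl):
--         sentence = sentence + "<EQUL" + str(i) + ">" + split_tmp[i + 1]
--         i += 1
--     #############<equl>에 대한 작업###################
--     return sentence, n_expr, n_arrw, n_unvar, n_equl
-- ===== SOURCE B (Python) =====
-- def _renumber(sentence, tok):
--     # one left-to-right character scan: replace each occurrence of tok by its
--     # numbered form and count the matches on the fly
--     body = tok[:-1]            # e.g. "<EXPR"
--     out = []
--     i = 0
--     n = 0
--     L = len(tok)
--     while i < len(sentence):
--         if sentence.startswith(tok, i):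
--             out.append(body + str(n) + ">")
--             n += 1
--             i += L
--         else:
--             out.append(sentence[i])
--             i += 1
--     return "".join(out), n
--
--
-- def replace_sentence_token(sentence):
--     sentence, n_expr = _renumber(sentence, "<EXPR>")
--     sentence, n_arrw = _renumber(sentence, "<ARRW>")
--     sentence, n_unvar = _renumber(sentence, "<UNVAR>")
--     sentence, n_equl = _renumber(sentence, "<EQUL>")
--     return sentence, n_expr, n_arrw, n_unvar, n_equl
-- ===== Notes on version B (the rewrite author's own statement) =====
-- stated objective: alternative
-- what changed: Each split/index-while/concatenate block is replaced by a single left-to-right character scan that emits the numbered token at each match and counts matches with a running counter, building the output pieces once and joining them, instead of splitting into a list and reassembling by repeated string concatenation.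
import Mathlib
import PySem

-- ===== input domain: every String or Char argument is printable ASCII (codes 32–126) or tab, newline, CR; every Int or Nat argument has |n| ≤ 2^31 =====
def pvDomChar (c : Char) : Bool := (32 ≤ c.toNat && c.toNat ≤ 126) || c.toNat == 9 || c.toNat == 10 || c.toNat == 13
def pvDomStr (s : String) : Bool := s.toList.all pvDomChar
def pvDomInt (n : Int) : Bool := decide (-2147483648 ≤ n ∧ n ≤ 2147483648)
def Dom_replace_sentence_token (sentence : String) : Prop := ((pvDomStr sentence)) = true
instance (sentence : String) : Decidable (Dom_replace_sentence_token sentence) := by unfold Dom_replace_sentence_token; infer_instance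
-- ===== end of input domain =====

-- B replaces A's four split/index-loop/concatenate blocks by a single left-to-right
-- character scan per token that numbers matches with a running counter (objective: alternative).

-- ===== PORT A =====
-- "<EXPR" + str(i) + ">"
def pvMkA (pre : List Char) (i : Int) : List Char := pre ++ PySem.Int.toChars i ++ ['>']

-- one of A's four identical blocks: split on tok, count = len(split)-1, rebuild with a while loop
def pvStepA (tok : List Char) (pre : List Char) (s : List Char) : List Char × Int :=
  match PySem.Chars.split? s tok with
  | none => (s, 0)   -- unreachable: every token is nonempty
  | some parts =>
    let n : Int := (parts.length : Int) - 1
    let s0 := (PySem.List.pyGet? parts 0).getD []   -- split_tmp[0]; split is never empty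
    ((PySem.List.pyRange 0 n 1).foldl
        (fun acc i => acc ++ pvMkA pre i ++ (PySem.List.pyGet? parts (i + 1)).getD []) s0,
     n)

def replace_sentence_token (sentence : String) : String × Int × Int × Int × Int :=
  let r1 := pvStepA "<EXPR>".toList "<EXPR".toList sentence.toList
  let r2 := pvStepA "<ARRW>".toList "<ARRW".toList r1.1
  let r3 := pvStepA "<UNVAR>".toList "<UNVAR".toList r2.1
  let r4 := pvStepA "<EQUL>".toList "<EQUL".toList r3.1
  (String.ofList r4.1, r1.2, r2.2, r3.2, r4.2)

-- ===== PORT B =====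
-- body + str(n) + ">"
def pvMkB (pre : List Char) (n : Int) : List Char := pre ++ PySem.Int.toChars n ++ ['>']

-- Source B's while loop over the string: at a match emit the numbered token and skip
-- len(tok) characters, otherwise copy one character (fuel = remaining length + 1)
def pvScanGo (tok pre : List Char) : Nat → List Char → Int → List Char × Int
  | 0, l, n => (l, n)
  | _ + 1, [], n => ([], n)
  | f + 1, c :: rest, n =>
    if tok.isPrefixOf (c :: rest) then
      let r := pvScanGo tok pre f ((c :: rest).drop tok.length) (n + 1)
      (pvMkB pre n ++ r.1, r.2)
    else
      let r := pvScanGo tok pre f rest n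
      (c :: r.1, r.2)

def pvRenumber (tok pre : List Char) (s : List Char) : List Char × Int :=
  pvScanGo tok pre (s.length + 1) s 0

def replace_sentence_token_alt (sentence : String) : String × Int × Int × Int × Int :=
  let r1 := pvRenumber "<EXPR>".toList "<EXPR".toList sentence.toList
  let r2 := pvRenumber "<ARRW>".toList "<ARRW".toList r1.1
  let r3 := pvRenumber "<UNVAR>".toList "<UNVAR".toList r2.1
  let r4 := pvRenumber "<EQUL>".toList "<EQUL".toList r3.1
  (String.ofList r4.1, r1.2, r2.2, r3.2, r4.2)

-- ===== PRECONDITION & SPEC =====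
def Spec_replace_sentence_token (sentence : String) (out : String × Int × Int × Int × Int) : Prop := out = replace_sentence_token_alt sentence
instance (sentence : String) (out : String × Int × Int × Int × Int) : Decidable (Spec_replace_sentence_token sentence out) := by unfold Spec_replace_sentence_token; infer_instance

-- ===== CLAIM (what is proved, stated in full; the proofs are below) =====
def Claim_equal_replace_sentence_token : Prop := ∀ (sentence : String), Dom_replace_sentence_token sentence → Spec_replace_sentence_token sentence (replace_sentence_token sentence)

-- ===== LEMMAS AND PROOFS =====

-- the numbered rejoin of the tail parts, counter starting at k
def pvTailJoin (pre : List Char) : Int → List (List Char) → List Char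
  | _, [] => []
  | k, q :: qs => pvMkA pre k ++ q ++ pvTailJoin pre (k + 1) qs

lemma pv_go_zero (sep l cur : List Char) (acc : List (List Char)) :
    PySem.Chars.splitOn.go sep 0 l cur acc = acc.reverse ++ [cur.reverse ++ l] := by
  simp [PySem.Chars.splitOn.go]

lemma pv_go_nil (sep cur : List Char) (acc : List (List Char)) (f : Nat) :
    PySem.Chars.splitOn.go sep (f + 1) [] cur acc = acc.reverse ++ [cur.reverse] := by
  simp [PySem.Chars.splitOn.go]

lemma pv_go_pos (sep cur rest : List Char) (c : Char) (acc : List (List Char)) (f : Nat)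
    (h : sep.isPrefixOf (c :: rest) = true) :
    PySem.Chars.splitOn.go sep (f + 1) (c :: rest) cur acc
      = PySem.Chars.splitOn.go sep f ((c :: rest).drop sep.length) [] (cur.reverse :: acc) := by
  conv_lhs => rw [PySem.Chars.splitOn.go]
  simp [h]

lemma pv_go_neg (sep cur rest : List Char) (c : Char) (acc : List (List Char)) (f : Nat)
    (h : ¬ sep.isPrefixOf (c :: rest) = true) :
    PySem.Chars.splitOn.go sep (f + 1) (c :: rest) cur acc
      = PySem.Chars.splitOn.go sep f rest (c :: cur) acc := by
  conv_lhs => rw [PySem.Chars.splitOn.go]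
  simp [h]

lemma pv_go_acc (sep : List Char) (fuel : Nat) :
    ∀ (l cur : List Char) (acc : List (List Char)),
      PySem.Chars.splitOn.go sep fuel l cur acc
        = acc.reverse ++ (PySem.Chars.splitOn.go sep fuel l [] []).modifyHead (cur.reverse ++ ·) := by
  induction fuel with
  | zero => intro l cur acc; simp [pv_go_zero]
  | succ f ih =>
    intro l cur acc
    cases l with
    | nil => simp [pv_go_nil]
    | cons c rest =>
      by_cases h : sep.isPrefixOf (c :: rest)
      · rw [pv_go_pos _ _ _ _ _ _ h, pv_go_pos _ _ _ _ _ _ h,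
            ih _ [] (cur.reverse :: acc), ih _ [] ([].reverse :: [])]
        cases hg : PySem.Chars.splitOn.go sep f ((c :: rest).drop sep.length) [] [] with
        | nil => simp
        | cons p ps => simp
      · rw [pv_go_neg _ _ _ _ _ _ h, pv_go_neg _ _ _ _ _ _ h,
            ih rest (c :: cur) acc, ih rest [c] []]
        cases hg : PySem.Chars.splitOn.go sep f rest [] [] with
        | nil => simp
        | cons p ps => simp

lemma pv_go_ne_nil (sep : List Char) (fuel : Nat) :
    ∀ (l : List Char), PySem.Chars.splitOn.go sep fuel l [] [] ≠ [] := by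
  induction fuel with
  | zero => intro l; simp [pv_go_zero]
  | succ f ih =>
    intro l
    cases l with
    | nil => simp [pv_go_nil]
    | cons c rest =>
      by_cases h : sep.isPrefixOf (c :: rest)
      · rw [pv_go_pos _ _ _ _ _ _ h, pv_go_acc]
        simp
      · rw [pv_go_neg _ _ _ _ _ _ h, pv_go_acc]
        cases hg : PySem.Chars.splitOn.go sep f rest [] [] with
        | nil => exact absurd hg (ih rest)
        | cons p ps => simp

-- B's scan equals "head of the split, then the numbered rejoin of the tail", and
-- the final counter is the start counter plus the number of matches
lemma pv_scan_split (tok pre : List Char) (fuel : Nat) :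
    ∀ (l : List Char) (n : Int),
      pvScanGo tok pre fuel l n
        = ((PySem.Chars.splitOn.go tok fuel l [] []).headD []
             ++ pvTailJoin pre n (PySem.Chars.splitOn.go tok fuel l [] []).tail,
           n + ((PySem.Chars.splitOn.go tok fuel l [] []).tail.length : Int)) := by
  induction fuel with
  | zero => intro l n; simp [pvScanGo, pv_go_zero, pvTailJoin]
  | succ f ih =>
    intro l n
    cases l with
    | nil => simp [pvScanGo, pv_go_nil, pvTailJoin]
    | cons c rest =>
      by_cases h : tok.isPrefixOf (c :: rest)
      · simp only [pvScanGo, h, if_true]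
        rw [ih _ (n + 1)]
        have hgo : PySem.Chars.splitOn.go tok (f + 1) (c :: rest) [] []
            = [] :: PySem.Chars.splitOn.go tok f ((c :: rest).drop tok.length) [] [] := by
          rw [pv_go_pos _ _ _ _ _ _ h, pv_go_acc]
          cases hg : PySem.Chars.splitOn.go tok f ((c :: rest).drop tok.length) [] [] with
          | nil => exact absurd hg (pv_go_ne_nil _ _ _)
          | cons p ps => simp
        rw [hgo]
        cases hg : PySem.Chars.splitOn.go tok f ((c :: rest).drop tok.length) [] [] with
        | nil => exact absurd hg (pv_go_ne_nil _ _ _)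
        | cons p ps =>
          simp only [List.headD_cons, List.tail_cons, pvTailJoin, List.nil_append,
            List.length_cons]
          rw [show pvMkB = pvMkA from rfl, List.append_assoc]
          congr 1
          push_cast
          ring
      · simp only [pvScanGo, h]
        rw [ih rest n]
        have hgo : PySem.Chars.splitOn.go tok (f + 1) (c :: rest) [] []
            = (PySem.Chars.splitOn.go tok f rest [] []).modifyHead (c :: ·) := by
          rw [pv_go_neg _ _ _ _ _ _ h, pv_go_acc]
          simp
        rw [hgo]
        cases hg : PySem.Chars.splitOn.go tok f rest [] [] with
        | nil => exact absurd hg (pv_go_ne_nil _ _ _)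
        | cons p ps => simp

-- A's while loop (a fold over range(n)) equals the numbered rejoin of the tail
lemma pv_foldA (pre : List Char) (h : List Char) (t : List (List Char)) :
    ∀ (d k : Nat) (acc : List Char), t.length = k + d →
      (PySem.List.pyRange (k : Int) (t.length : Int) 1).foldl
          (fun acc i => acc ++ pvMkA pre i ++ (PySem.List.pyGet? (h :: t) (i + 1)).getD []) acc
        = acc ++ pvTailJoin pre (k : Int) (t.drop k) := by
  intro d
  induction d with
  | zero =>
    intro k acc hk
    have h1 : (k : Int) = (t.length : Int) := by omega
    have h2 : t.drop k = [] := by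
      apply List.drop_eq_nil_of_le; omega
    rw [h1, h2]
    simp [PySem.List.pyRange, pvTailJoin]
  | succ d ih =>
    intro k acc hk
    have hklt : k < t.length := by omega
    rw [PySem.List.pyRange_one_cons (by exact_mod_cast hklt)]
    rw [List.foldl_cons]
    have hget : PySem.List.pyGet? (h :: t) ((k : Int) + 1) = some t[k] := by
      have h3 : ((k : Int) + 1) = ((k + 1 : Nat) : Int) := by push_cast; ring
      rw [h3, PySem.List.pyGet?_natCast]
      simp [List.getElem?_eq_getElem hklt]
    rw [hget]
    have hstep : ((k : Int) + 1) = ((k + 1 : Nat) : Int) := by push_cast; ring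
    rw [hstep, ih (k + 1) _ (by omega)]
    have hdrop : t.drop k = t[k] :: t.drop (k + 1) := List.drop_eq_getElem_cons hklt
    rw [hdrop]
    simp [pvTailJoin]

lemma pv_step_eq (tok pre s : List Char) (htok : tok ≠ []) :
    pvStepA tok pre s = pvRenumber tok pre s := by
  unfold pvStepA pvRenumber
  have hsep : tok.isEmpty = false := by
    cases tok with
    | nil => exact absurd rfl htok
    | cons c cs => rfl
  rw [PySem.Chars.split?, if_neg (by simp [hsep])]
  simp only [PySem.Chars.splitOn]
  cases hg : PySem.Chars.splitOn.go tok (s.length + 1) s [] [] with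
  | nil => exact absurd hg (pv_go_ne_nil _ _ _)
  | cons p ps =>
    rw [pv_scan_split tok pre (s.length + 1) s 0, hg]
    simp only [List.headD_cons, List.tail_cons]
    have hn : ((p :: ps).length : Int) - 1 = (ps.length : Int) := by
      simp [List.length_cons]
    rw [hn]
    have h0 : (PySem.List.pyGet? (p :: ps) 0).getD [] = p := by
      simp [PySem.List.pyGet?, PySem.List.pyIdx?]
    rw [h0]
    have hf := pv_foldA pre p ps ps.length 0 p (by omega)
    simp only [Nat.cast_zero, List.drop_zero] at hf
    rw [hf]
    simp

-- ===== VERDICT (by name: the statement is the Claim_ definition above) =====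
theorem replace_sentence_token_spec : Claim_equal_replace_sentence_token := by
  intro sentence _
  have e1 : ∀ s, pvStepA "<EXPR>".toList "<EXPR".toList s = pvRenumber "<EXPR>".toList "<EXPR".toList s :=
    fun s => pv_step_eq _ _ s (by decide)
  have e2 : ∀ s, pvStepA "<ARRW>".toList "<ARRW".toList s = pvRenumber "<ARRW>".toList "<ARRW".toList s :=
    fun s => pv_step_eq _ _ s (by decide)
  have e3 : ∀ s, pvStepA "<UNVAR>".toList "<UNVAR".toList s = pvRenumber "<UNVAR>".toList "<UNVAR".toList s :=
    fun s => pv_step_eq _ _ s (by decide)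
  have e4 : ∀ s, pvStepA "<EQUL>".toList "<EQUL".toList s = pvRenumber "<EQUL>".toList "<EQUL".toList s :=
    fun s => pv_step_eq _ _ s (by decide)
  simp only [Spec_replace_sentence_token, replace_sentence_token, replace_sentence_token_alt,
    e1, e2, e3, e4]
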